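-- pv_equiv track=rewrite | github.com/Mercyapf/frappe-wiki | wiki/frappe_wiki/doctype/wiki_change_request/wiki_change_request.py | edits_conflict
-- ===== SOURCE A (Python) =====
-- def edits_conflict(
-- 	ours_edits: list[tuple[int, int, list[str]]],
-- 	theirs_edits: list[tuple[int, int, list[str]]],
-- ) -> bool:
-- 	for i1, i2, o_lines in ours_edits:
-- 		for j1, j2, t_lines in theirs_edits:
-- 			if i1 == i2 and j1 == j2 and i1 == j1:
-- 				if o_lines != t_lines:
-- 					return True
-- 				continue
-- 			if ranges_overlap(i1, i2, j1, j2):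
-- 				return True
-- 			if i1 == i2 and j1 <= i1 < j2:
-- 				return True
-- 			if j1 == j2 and i1 <= j1 < i2:
-- 				return True
-- 	return False
--
-- def ranges_overlap(a_start: int, a_end: int, b_start: int, b_end: int) -> bool:
-- 	return max(a_start, b_start) < min(a_end, b_end)
-- ===== SOURCE B (Python) =====
-- def edits_conflict(
-- 	ours_edits: list[tuple[int, int, list[str]]],
-- 	theirs_edits: list[tuple[int, int, list[str]]],
-- ) -> bool:
-- 	# Split each side into non-empty half-open intervals and points (s == e),
-- 	# grouping the distinct line-contents of points by position.
-- 	def split(edits):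
-- 		ivals = []
-- 		pts = {}
-- 		for s, e, lines in edits:
-- 			if s < e:
-- 				ivals.append((s, e))
-- 			elif s == e:
-- 				g = pts.setdefault(s, [])
-- 				t = tuple(lines)
-- 				if t not in g:
-- 					g.append(t)
-- 		return ivals, pts
--
-- 	o_iv, o_pt = split(ours_edits)
-- 	t_iv, t_pt = split(theirs_edits)
--
-- 	# point-vs-point: two same-position zero-length edits conflict iff contents differ
-- 	for pos, og in o_pt.items():
-- 		tg = t_pt.get(pos)
-- 		if tg is not None and (len(og) > 1 or len(tg) > 1 or og[0] != tg[0]):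
-- 			return True
--
-- 	# interval overlaps: a point acts as [p, p+1) against a real interval of the
-- 	# other side.  Two sorted sweeps, each O(n+m) after sorting.
-- 	t_all = t_iv + [(p, p + 1) for p in t_pt]
-- 	o_pts = [(p, p + 1) for p in o_pt]
-- 	return any_cross_overlap(o_iv, t_all) or any_cross_overlap(o_pts, t_iv)
--
--
-- def any_cross_overlap(xs, ys):
-- 	xs = sorted(xs, key=lambda iv: iv[0])
-- 	ys = sorted(ys, key=lambda iv: iv[0])
-- 	i = j = 0
-- 	while i < len(xs) and j < len(ys):
-- 		s1, e1 = xs[i]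
-- 		s2, e2 = ys[j]
-- 		if s1 < e2 and s2 < e1:
-- 			return True
-- 		if e1 <= e2:
-- 			i += 1
-- 		else:
-- 			j += 1
-- 	return False
-- ===== Notes on version B (the rewrite author's own statement) =====
-- stated objective: alternative
-- what changed: A tests every ours-edit against every theirs-edit; B splits each side once into non-empty intervals and position-grouped zero-length edits, detects point-point conflicts via one dict lookup per position, and finds cross-list interval overlaps with sort + a two-pointer sweep.
import Mathlib
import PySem

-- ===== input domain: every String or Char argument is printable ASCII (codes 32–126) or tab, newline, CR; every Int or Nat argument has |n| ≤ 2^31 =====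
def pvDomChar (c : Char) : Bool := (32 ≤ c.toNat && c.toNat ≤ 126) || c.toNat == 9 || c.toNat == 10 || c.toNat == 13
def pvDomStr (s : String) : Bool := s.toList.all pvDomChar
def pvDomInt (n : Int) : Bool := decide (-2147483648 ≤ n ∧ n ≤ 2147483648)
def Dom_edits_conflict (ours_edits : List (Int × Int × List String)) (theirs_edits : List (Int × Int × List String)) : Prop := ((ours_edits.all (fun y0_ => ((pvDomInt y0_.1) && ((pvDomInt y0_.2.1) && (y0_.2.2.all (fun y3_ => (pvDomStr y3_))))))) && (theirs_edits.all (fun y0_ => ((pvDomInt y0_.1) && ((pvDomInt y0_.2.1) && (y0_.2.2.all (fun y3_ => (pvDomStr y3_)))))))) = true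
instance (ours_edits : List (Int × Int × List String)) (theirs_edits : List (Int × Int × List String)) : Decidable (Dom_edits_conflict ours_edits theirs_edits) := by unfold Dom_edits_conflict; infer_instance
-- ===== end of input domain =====

-- B replaces A's all-pairs scan by a different algorithm: split each side into intervals and position-grouped points, then dict lookups and a sort + two-pointer sweep (objective: alternative).

-- ===== PORT A =====
def ranges_overlap (a_start : Int) (a_end : Int) (b_start : Int) (b_end : Int) : Bool :=
  decide (max a_start b_start < min a_end b_end)

-- inner 'for j1, j2, t_lines in theirs_edits' loop with its early returns
def pvInnerA (i1 : Int) (i2 : Int) (o_lines : List String) : List (Int × Int × List String) → Bool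
  | [] => false
  | (j1, j2, t_lines) :: rest =>
    if i1 = i2 ∧ j1 = j2 ∧ i1 = j1 then
      (if o_lines ≠ t_lines then true else pvInnerA i1 i2 o_lines rest)
    else if ranges_overlap i1 i2 j1 j2 then true
    else if i1 = i2 ∧ j1 ≤ i1 ∧ i1 < j2 then true
    else if j1 = j2 ∧ i1 ≤ j1 ∧ j1 < i2 then true
    else pvInnerA i1 i2 o_lines rest

def edits_conflict (ours_edits : List (Int × Int × List String)) (theirs_edits : List (Int × Int × List String)) : Bool :=
  match ours_edits with
  | [] => false
  | (i1, i2, o_lines) :: rest =>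
    if pvInnerA i1 i2 o_lines theirs_edits then true else edits_conflict rest theirs_edits

-- ===== PORT B =====
-- one step of split's loop: collect non-empty intervals; group distinct point contents by position
def pvSplitStep (acc : List (Int × Int) × PySem.Dict Int (List (List String))) (x : Int × Int × List String) :
    List (Int × Int) × PySem.Dict Int (List (List String)) :=
  match x with
  | (s, e, lines) =>
    if s < e then (acc.1 ++ [(s, e)], acc.2)
    else if s = e then
      (acc.1, acc.2.modify s [] (fun g => if lines ∈ g then g else g ++ [lines]))
    else acc

def pvSplit (edits : List (Int × Int × List String)) :
    List (Int × Int) × PySem.Dict Int (List (List String)) :=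
  edits.foldl pvSplitStep ([], PySem.Dict.empty)

-- the 'for pos, og in o_pt.items()' loop
def pvPtLoop (tp : PySem.Dict Int (List (List String))) : List (Int × List (List String)) → Bool
  | [] => false
  | (pos, og) :: rest =>
    match tp.get? pos with
    | some tg =>
      if 1 < og.length ∨ 1 < tg.length ∨ og.headD [] ≠ tg.headD [] then true else pvPtLoop tp rest
    | none => pvPtLoop tp rest

-- the two-pointer while loop of any_cross_overlap
def pvSweep : List (Int × Int) → List (Int × Int) → Bool
  | [], _ => false
  | _ :: _, [] => false
  | (s1, e1) :: xs, (s2, e2) :: ys =>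
    if s1 < e2 ∧ s2 < e1 then true
    else if e1 ≤ e2 then pvSweep xs ((s2, e2) :: ys)
    else pvSweep ((s1, e1) :: xs) ys
termination_by xs ys => xs.length + ys.length

def any_cross_overlap (xs : List (Int × Int)) (ys : List (Int × Int)) : Bool :=
  pvSweep (PySem.List.sorted xs (fun iv => iv.1)) (PySem.List.sorted ys (fun iv => iv.1))

def edits_conflict_alt (ours_edits : List (Int × Int × List String)) (theirs_edits : List (Int × Int × List String)) : Bool :=
  let o := pvSplit ours_edits
  let t := pvSplit theirs_edits
  if pvPtLoop t.2 o.2.items then true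
  else
    let t_all := t.1 ++ t.2.keys.map (fun p => (p, p + 1))
    let o_pts := o.2.keys.map (fun p => (p, p + 1))
    any_cross_overlap o.1 t_all || any_cross_overlap o_pts t.1

-- ===== PRECONDITION & SPEC =====
def Spec_edits_conflict (ours_edits : List (Int × Int × List String)) (theirs_edits : List (Int × Int × List String)) (out : Bool) : Prop := out = edits_conflict_alt ours_edits theirs_edits
instance (ours_edits : List (Int × Int × List String)) (theirs_edits : List (Int × Int × List String)) (out : Bool) : Decidable (Spec_edits_conflict ours_edits theirs_edits out) := by unfold Spec_edits_conflict; infer_instance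

-- ===== CLAIM (what is proved, stated in full; the proofs are below) =====
def Claim_equal_edits_conflict : Prop := ∀ (ours_edits : List (Int × Int × List String)) (theirs_edits : List (Int × Int × List String)), Dom_edits_conflict ours_edits theirs_edits → Spec_edits_conflict ours_edits theirs_edits (edits_conflict ours_edits theirs_edits)

-- ===== LEMMAS AND PROOFS =====

-- the pairwise conflict condition A tests (proof-only abbreviation)
def ConflP (x y : Int × Int × List String) : Prop :=
  (x.1 = x.2.1 ∧ y.1 = y.2.1 ∧ x.1 = y.1 ∧ x.2.2 ≠ y.2.2)
  ∨ max x.1 y.1 < min x.2.1 y.2.1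
  ∨ (x.1 = x.2.1 ∧ y.1 ≤ x.1 ∧ x.1 < y.2.1)
  ∨ (y.1 = y.2.1 ∧ x.1 ≤ y.1 ∧ y.1 < x.2.1)

lemma pvInnerA_iff (i1 i2 : Int) (o : List String) (th : List (Int × Int × List String)) :
    pvInnerA i1 i2 o th = true ↔ ∃ y ∈ th, ConflP (i1, i2, o) y := by
  induction th with
  | nil => simp [pvInnerA]
  | cons y rest ih =>
    obtain ⟨j1, j2, t⟩ := y
    simp only [pvInnerA]
    split_ifs with h1 h2 h3 h4 h5
    · simp only [true_iff]
      exact ⟨(j1, j2, t), List.mem_cons_self, Or.inl ⟨h1.1, h1.2.1, h1.2.2, h2⟩⟩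
    · rw [ih]
      constructor
      · rintro ⟨y, hy, hc⟩; exact ⟨y, List.mem_cons_of_mem _ hy, hc⟩
      · rintro ⟨y, hy, hc⟩
        rcases List.mem_cons.mp hy with rfl | hy
        · push_neg at h2
          simp only [ConflP] at hc
          rcases hc with ⟨_, _, _, hne⟩ | h | h | h
          · exact absurd h2 hne
          · omega
          · omega
          · omega
        · exact ⟨y, hy, hc⟩
    · simp only [true_iff]
      refine ⟨(j1, j2, t), List.mem_cons_self, Or.inr (Or.inl ?_)⟩
      simpa [ranges_overlap] using h3
    · simp only [true_iff]
      exact ⟨(j1, j2, t), List.mem_cons_self, Or.inr (Or.inr (Or.inl ⟨h4.1, h4.2.1, h4.2.2⟩))⟩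
    · simp only [true_iff]
      exact ⟨(j1, j2, t), List.mem_cons_self, Or.inr (Or.inr (Or.inr ⟨h5.1, h5.2.1, h5.2.2⟩))⟩
    · rw [ih]
      constructor
      · rintro ⟨y, hy, hc⟩; exact ⟨y, List.mem_cons_of_mem _ hy, hc⟩
      · rintro ⟨y, hy, hc⟩
        rcases List.mem_cons.mp hy with rfl | hy
        · simp only [ConflP] at hc
          simp only [ranges_overlap, decide_eq_true_eq] at h3
          rcases hc with ⟨ha, hb, hd, _⟩ | h | h | h
          · exact absurd ⟨ha, hb, hd⟩ h1
          · exact absurd h h3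
          · exact absurd h h4
          · exact absurd h h5
        · exact ⟨y, hy, hc⟩

lemma edits_conflict_iff (O T : List (Int × Int × List String)) :
    edits_conflict O T = true ↔ ∃ x ∈ O, ∃ y ∈ T, ConflP x y := by
  induction O with
  | nil => simp [edits_conflict]
  | cons x rest ih =>
    obtain ⟨i1, i2, o⟩ := x
    simp only [edits_conflict]
    split_ifs with h
    · simp only [true_iff]
      obtain ⟨y, hy, hc⟩ := (pvInnerA_iff i1 i2 o T).mp h
      exact ⟨(i1, i2, o), List.mem_cons_self, y, hy, hc⟩
    · rw [ih]
      constructor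
      · rintro ⟨x, hx, hy⟩; exact ⟨x, List.mem_cons_of_mem _ hx, hy⟩
      · rintro ⟨x, hx, y, hy, hc⟩
        rcases List.mem_cons.mp hx with rfl | hx
        · exact absurd ((pvInnerA_iff i1 i2 o T).mpr ⟨y, hy, hc⟩) (by simp [h])
        · exact ⟨x, hx, y, hy, hc⟩

-- characterisation of pvSplit: interval part
lemma mem_split_iv (es : List (Int × Int × List String))
    (acc : List (Int × Int) × PySem.Dict Int (List (List String))) (iv : Int × Int) :
    iv ∈ (es.foldl pvSplitStep acc).1 ↔ iv ∈ acc.1 ∨ (∃ l, (iv.1, iv.2, l) ∈ es ∧ iv.1 < iv.2) := by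
  induction es generalizing acc with
  | nil => simp
  | cons x es ih =>
    obtain ⟨s, e, l0⟩ := x
    obtain ⟨a, b⟩ := iv
    rw [List.foldl_cons, ih]
    simp only [pvSplitStep, List.mem_cons, Prod.mk.injEq]
    split_ifs with hse hseq
    · simp only [List.mem_append, List.mem_singleton, Prod.mk.injEq]
      constructor
      · rintro ((h | ⟨rfl, rfl⟩) | ⟨l, hl, hab⟩)
        · exact Or.inl h
        · exact Or.inr ⟨l0, Or.inl ⟨rfl, rfl, rfl⟩, hse⟩
        · exact Or.inr ⟨l, Or.inr hl, hab⟩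
      · rintro (h | ⟨l, ⟨h1, h2, h3⟩ | hl, hab⟩)
        · exact Or.inl (Or.inl h)
        · exact Or.inl (Or.inr ⟨h1, h2⟩)
        · exact Or.inr ⟨l, hl, hab⟩
    · constructor
      · rintro (h | ⟨l, hl, hab⟩)
        · exact Or.inl h
        · exact Or.inr ⟨l, Or.inr hl, hab⟩
      · rintro (h | ⟨l, ⟨h1, h2, h3⟩ | hl, hab⟩)
        · exact Or.inl h
        · omega
        · exact Or.inr ⟨l, hl, hab⟩
    · constructor
      · rintro (h | ⟨l, hl, hab⟩)
        · exact Or.inl h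
        · exact Or.inr ⟨l, Or.inr hl, hab⟩
      · rintro (h | ⟨l, ⟨h1, h2, h3⟩ | hl, hab⟩)
        · exact Or.inl h
        · omega
        · exact Or.inr ⟨l, hl, hab⟩

-- characterisation of pvSplit: point groups
lemma mem_split_getD (es : List (Int × Int × List String))
    (acc : List (Int × Int) × PySem.Dict Int (List (List String))) (p : Int) (g : List String) :
    g ∈ (es.foldl pvSplitStep acc).2.getD p [] ↔ g ∈ acc.2.getD p [] ∨ (p, p, g) ∈ es := by
  induction es generalizing acc with
  | nil => simp
  | cons x es ih =>
    obtain ⟨s, e, l0⟩ := x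
    rw [List.foldl_cons, ih]
    simp only [pvSplitStep, List.mem_cons, Prod.mk.injEq]
    split_ifs with hse hseq
    · constructor
      · rintro (h | h) <;> tauto
      · rintro (h | ⟨h1, h2, h3⟩ | h) <;> first | tauto | omega
    · subst hseq
      rw [PySem.Dict.getD_modify]
      split_ifs with hps hin
      · subst hps
        constructor
        · rintro (h | h) <;> tauto
        · rintro (h | ⟨h1, h2, rfl⟩ | h) <;> tauto
      · subst hps
        simp only [List.mem_append, List.mem_singleton]
        constructor
        · rintro ((h | h) | h) <;> tauto
        · rintro (h | ⟨h1, h2, rfl⟩ | h) <;> tauto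
      · constructor
        · rintro (h | h) <;> tauto
        · rintro (h | ⟨h1, h2, h3⟩ | h)
          · tauto
          · exact absurd h1 hps
          · tauto
    · constructor
      · rintro (h | h) <;> tauto
      · rintro (h | ⟨h1, h2, h3⟩ | h) <;> first | tauto | omega

lemma mem_split_keys (es : List (Int × Int × List String))
    (acc : List (Int × Int) × PySem.Dict Int (List (List String))) (p : Int) :
    p ∈ (es.foldl pvSplitStep acc).2.keys ↔ p ∈ acc.2.keys ∨ (∃ l, (p, p, l) ∈ es) := by
  induction es generalizing acc with
  | nil => simp
  | cons x es ih =>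
    obtain ⟨s, e, l0⟩ := x
    rw [List.foldl_cons, ih]
    simp only [pvSplitStep, List.mem_cons, Prod.mk.injEq]
    split_ifs with hse hseq
    · constructor
      · rintro (h | ⟨l, hl⟩)
        · exact Or.inl h
        · exact Or.inr ⟨l, Or.inr hl⟩
      · rintro (h | ⟨l, ⟨h1, h2, h3⟩ | hl⟩)
        · exact Or.inl h
        · omega
        · exact Or.inr ⟨l, hl⟩
    · subst hseq
      rw [PySem.Dict.keys_modify]
      simp only [PySem.Dict.mem_keys_insert]
      constructor
      · rintro ((rfl | h) | ⟨l, hl⟩)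
        · exact Or.inr ⟨l0, Or.inl ⟨rfl, rfl, rfl⟩⟩
        · exact Or.inl h
        · exact Or.inr ⟨l, Or.inr hl⟩
      · rintro (h | ⟨l, ⟨h1, h2, h3⟩ | hl⟩)
        · exact Or.inl (Or.inr h)
        · exact Or.inl (Or.inl h1)
        · exact Or.inr ⟨l, hl⟩
    · constructor
      · rintro (h | ⟨l, hl⟩)
        · exact Or.inl h
        · exact Or.inr ⟨l, Or.inr hl⟩
      · rintro (h | ⟨l, ⟨h1, h2, h3⟩ | hl⟩)
        · exact Or.inl h
        · omega
        · exact Or.inr ⟨l, hl⟩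

lemma split_keys_nodup (es : List (Int × Int × List String))
    (acc : List (Int × Int) × PySem.Dict Int (List (List String))) (h : acc.2.keys.Nodup) :
    (es.foldl pvSplitStep acc).2.keys.Nodup := by
  induction es generalizing acc with
  | nil => exact h
  | cons x es ih =>
    obtain ⟨s, e, l0⟩ := x
    rw [List.foldl_cons]
    apply ih
    simp only [pvSplitStep]
    split_ifs with hse hseq
    · exact h
    · rw [PySem.Dict.keys_modify]
      exact PySem.Dict.nodup_keys_insert _ _ _ h
    · exact h

lemma split_getD_nodup (es : List (Int × Int × List String))
    (acc : List (Int × Int) × PySem.Dict Int (List (List String))) (p : Int)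
    (h : (acc.2.getD p []).Nodup) : ((es.foldl pvSplitStep acc).2.getD p []).Nodup := by
  induction es generalizing acc with
  | nil => exact h
  | cons x es ih =>
    obtain ⟨s, e, l0⟩ := x
    rw [List.foldl_cons]
    apply ih
    simp only [pvSplitStep]
    split_ifs with hse hseq
    · exact h
    · rw [PySem.Dict.getD_modify]
      split_ifs with hps hin
      · subst hps; exact h
      · subst hps
        refine List.Nodup.append h (List.nodup_singleton _) ?_
        intro a ha hb
        simp only [List.mem_singleton] at hb
        exact hin (hb ▸ ha)
      · exact h
    · exact h

lemma split_getD_ne_nil (es : List (Int × Int × List String))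
    (acc : List (Int × Int) × PySem.Dict Int (List (List String)))
    (h : ∀ p ∈ acc.2.keys, acc.2.getD p [] ≠ []) :
    ∀ p ∈ (es.foldl pvSplitStep acc).2.keys, (es.foldl pvSplitStep acc).2.getD p [] ≠ [] := by
  induction es generalizing acc with
  | nil => exact h
  | cons x es ih =>
    obtain ⟨s, e, l0⟩ := x
    rw [List.foldl_cons]
    apply ih
    simp only [pvSplitStep]
    split_ifs with hse hseq
    · exact h
    · intro p hp
      rw [PySem.Dict.keys_modify, PySem.Dict.mem_keys_insert] at hp
      rw [PySem.Dict.getD_modify]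
      split_ifs with hps hin
      · subst hps
        intro hnil; rw [hnil] at hin; simp at hin
      · simp
      · rcases hp with rfl | hp
        · exact absurd rfl hps
        · exact h p hp
    · exact h

lemma pvPtLoop_iff (tp : PySem.Dict Int (List (List String))) (l : List (Int × List (List String))) :
    pvPtLoop tp l = true ↔ ∃ pr ∈ l, ∃ tg, tp.get? pr.1 = some tg ∧
      (1 < pr.2.length ∨ 1 < tg.length ∨ pr.2.headD [] ≠ tg.headD []) := by
  induction l with
  | nil => simp [pvPtLoop]
  | cons pr rest ih =>
    obtain ⟨pos, og⟩ := pr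
    simp only [pvPtLoop]
    cases hget : tp.get? pos with
    | none =>
      dsimp only
      rw [ih]
      constructor
      · rintro ⟨pr, hpr, tg, htg, hc⟩; exact ⟨pr, List.mem_cons_of_mem _ hpr, tg, htg, hc⟩
      · rintro ⟨pr, hpr, tg, htg, hc⟩
        rcases List.mem_cons.mp hpr with rfl | hpr
        · rw [hget] at htg; exact absurd htg (by simp)
        · exact ⟨pr, hpr, tg, htg, hc⟩
    | some tg =>
      dsimp only
      split_ifs with hc
      · simp only [true_iff]
        exact ⟨(pos, og), List.mem_cons_self, tg, hget, hc⟩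
      · rw [ih]
        constructor
        · rintro ⟨pr, hpr, tg, htg, hcc⟩; exact ⟨pr, List.mem_cons_of_mem _ hpr, tg, htg, hcc⟩
        · rintro ⟨pr, hpr, tg2, htg, hcc⟩
          rcases List.mem_cons.mp hpr with rfl | hpr
          · rw [hget] at htg
            cases htg
            exact absurd hcc hc
          · exact ⟨pr, hpr, tg2, htg, hcc⟩

-- the group test fires iff some pair of grouped contents differs
lemma group_test_iff (og tg : List (List String)) (hog : og ≠ []) (htg : tg ≠ [])
    (hnog : og.Nodup) (hntg : tg.Nodup) :
    (1 < og.length ∨ 1 < tg.length ∨ og.headD [] ≠ tg.headD []) ↔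
      ∃ a ∈ og, ∃ b ∈ tg, a ≠ b := by
  obtain ⟨a, og', rfl⟩ := List.exists_cons_of_ne_nil hog
  obtain ⟨b, tg', rfl⟩ := List.exists_cons_of_ne_nil htg
  constructor
  · rintro (hlen | hlen | hhd)
    · have hne : og' ≠ [] := by intro hnil; rw [hnil] at hlen; simp at hlen
      obtain ⟨c, og'', rfl⟩ := List.exists_cons_of_ne_nil hne
      have hac : a ≠ c := by
        intro hac; subst hac
        exact (List.nodup_cons.mp hnog).1 List.mem_cons_self
      by_cases hab : a = b
      · exact ⟨c, by simp, b, by simp, fun hcb => hac (hab.trans hcb.symm)⟩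
      · exact ⟨a, by simp, b, by simp, hab⟩
    · have hne : tg' ≠ [] := by intro hnil; rw [hnil] at hlen; simp at hlen
      obtain ⟨c, tg'', rfl⟩ := List.exists_cons_of_ne_nil hne
      have hbc : b ≠ c := by
        intro hbc; subst hbc
        exact (List.nodup_cons.mp hntg).1 List.mem_cons_self
      by_cases hab : a = b
      · exact ⟨a, by simp, c, by simp, fun hac => hbc (hab.symm.trans hac)⟩
      · exact ⟨a, by simp, b, by simp, hab⟩
    · exact ⟨a, by simp, b, by simp, by simpa using hhd⟩
  · rintro ⟨x, hx, y, hy, hne⟩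
    by_contra hno
    push_neg at hno
    obtain ⟨h1, h2, h3⟩ := hno
    have hog' : og' = [] := by
      cases og' with
      | nil => rfl
      | cons _ _ => simp at h1
    have htg' : tg' = [] := by
      cases tg' with
      | nil => rfl
      | cons _ _ => simp at h2
    subst hog'; subst htg'
    simp only [List.mem_singleton] at hx hy
    subst hx; subst hy
    simp only [List.headD_cons] at h3
    exact hne h3

lemma pvSweep_iff_aux (n : Nat) : ∀ (xs ys : List (Int × Int)), xs.length + ys.length ≤ n →
    (∀ p ∈ xs, p.1 < p.2) → (∀ p ∈ ys, p.1 < p.2) →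
    xs.Pairwise (fun a b => a.1 ≤ b.1) → ys.Pairwise (fun a b => a.1 ≤ b.1) →
    (pvSweep xs ys = true ↔ ∃ x ∈ xs, ∃ y ∈ ys, max x.1 y.1 < min x.2 y.2) := by
  induction n with
  | zero =>
    intro xs ys hlen hx hy sx sy
    cases xs with
    | nil => simp [pvSweep]
    | cons x xs => simp at hlen
  | succ n ih =>
    intro xs ys hlen hx hy sx sy
    cases xs with
    | nil => simp [pvSweep]
    | cons x xs =>
      cases ys with
      | nil =>
        obtain ⟨s1, e1⟩ := x
        simp [pvSweep]
      | cons y ys =>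
        obtain ⟨s1, e1⟩ := x
        obtain ⟨s2, e2⟩ := y
        have h1 : s1 < e1 := hx (s1, e1) List.mem_cons_self
        have h2 : s2 < e2 := hy (s2, e2) List.mem_cons_self
        simp only [pvSweep]
        split_ifs with hov hle
        · simp only [true_iff]
          refine ⟨(s1, e1), List.mem_cons_self, (s2, e2), List.mem_cons_self, ?_⟩
          show max s1 s2 < min e1 e2
          simp only [max_lt_iff, lt_min_iff]
          omega
        · rw [ih xs ((s2, e2) :: ys) (by simp at hlen ⊢; omega)
            (fun p hp => hx p (List.mem_cons_of_mem _ hp)) hy sx.of_cons sy]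
          have hs2 : ∀ y' ∈ (s2, e2) :: ys, s2 ≤ y'.1 := by
            intro y' hy'
            rcases List.mem_cons.mp hy' with rfl | hy'
            · simp
            · exact (List.pairwise_cons.mp sy).1 y' hy'
          constructor
          · rintro ⟨x', hx', y', hy', hov'⟩
            exact ⟨x', List.mem_cons_of_mem _ hx', y', hy', hov'⟩
          · rintro ⟨x', hx', y', hy', hov'⟩
            rcases List.mem_cons.mp hx' with rfl | hx'
            · exfalso
              obtain ⟨t1, t2⟩ := y'
              have hst : s2 ≤ t1 := hs2 (t1, t2) hy'
              have ht : t1 < t2 := hy (t1, t2) hy'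
              have hov2 : max s1 t1 < min e1 t2 := hov'
              simp only [max_lt_iff, lt_min_iff] at hov2
              omega
            · exact ⟨x', hx', y', hy', hov'⟩
        · rw [ih ((s1, e1) :: xs) ys (by simp at hlen ⊢; omega) hx
            (fun p hp => hy p (List.mem_cons_of_mem _ hp)) sx sy.of_cons]
          have hs1 : ∀ x' ∈ (s1, e1) :: xs, s1 ≤ x'.1 := by
            intro x' hx'
            rcases List.mem_cons.mp hx' with rfl | hx'
            · simp
            · exact (List.pairwise_cons.mp sx).1 x' hx'
          constructor
          · rintro ⟨x', hx', y', hy', hov'⟩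
            exact ⟨x', hx', y', List.mem_cons_of_mem _ hy', hov'⟩
          · rintro ⟨x', hx', y', hy', hov'⟩
            rcases List.mem_cons.mp hy' with rfl | hy'
            · exfalso
              obtain ⟨t1, t2⟩ := x'
              have hst : s1 ≤ t1 := hs1 (t1, t2) hx'
              have ht : t1 < t2 := hx (t1, t2) hx'
              have hov2 : max t1 s2 < min t2 e2 := hov'
              simp only [max_lt_iff, lt_min_iff] at hov2
              omega
            · exact ⟨x', hx', y', hy', hov'⟩

lemma pvSweep_iff (xs ys : List (Int × Int))
    (hx : ∀ p ∈ xs, p.1 < p.2) (hy : ∀ p ∈ ys, p.1 < p.2)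
    (sx : xs.Pairwise (fun a b => a.1 ≤ b.1)) (sy : ys.Pairwise (fun a b => a.1 ≤ b.1)) :
    pvSweep xs ys = true ↔ ∃ x ∈ xs, ∃ y ∈ ys, max x.1 y.1 < min x.2 y.2 :=
  pvSweep_iff_aux (xs.length + ys.length) xs ys le_rfl hx hy sx sy

lemma any_cross_overlap_iff (xs ys : List (Int × Int))
    (hx : ∀ p ∈ xs, p.1 < p.2) (hy : ∀ p ∈ ys, p.1 < p.2) :
    any_cross_overlap xs ys = true ↔ ∃ x ∈ xs, ∃ y ∈ ys, max x.1 y.1 < min x.2 y.2 := by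
  unfold any_cross_overlap
  rw [pvSweep_iff _ _ (fun p hp => hx p ((PySem.List.mem_sorted _ _ _ _).mp hp))
      (fun p hp => hy p ((PySem.List.mem_sorted _ _ _ _).mp hp))
      (PySem.List.sorted_pairwise _ _) (PySem.List.sorted_pairwise _ _)]
  constructor
  · rintro ⟨x, hx', y, hy', h⟩
    exact ⟨x, (PySem.List.mem_sorted _ _ _ _).mp hx', y, (PySem.List.mem_sorted _ _ _ _).mp hy', h⟩
  · rintro ⟨x, hx', y, hy', h⟩
    exact ⟨x, (PySem.List.mem_sorted _ _ _ _).mpr hx', y, (PySem.List.mem_sorted _ _ _ _).mpr hy', h⟩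

lemma ConflP_cases (x y : Int × Int × List String) : ConflP x y ↔
    (x.1 = x.2.1 ∧ y.1 = y.2.1 ∧ x.1 = y.1 ∧ x.2.2 ≠ y.2.2)
    ∨ (x.1 < x.2.1 ∧ ((y.1 < y.2.1 ∧ max x.1 y.1 < min x.2.1 y.2.1)
        ∨ (y.1 = y.2.1 ∧ x.1 ≤ y.1 ∧ y.1 < x.2.1)))
    ∨ (x.1 = x.2.1 ∧ y.1 < y.2.1 ∧ y.1 ≤ x.1 ∧ x.1 < y.2.1) := by
  obtain ⟨a1, a2, lo⟩ := x
  obtain ⟨b1, b2, lt'⟩ := y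
  simp only [ConflP]
  constructor
  · rintro (⟨h1, h2, h3, h4⟩ | h | h | h)
    · exact Or.inl ⟨h1, h2, h3, h4⟩
    · have h' : max a1 b1 < min a2 b2 := h
      simp only [max_lt_iff, lt_min_iff] at h'
      refine Or.inr (Or.inl ⟨by omega, Or.inl ⟨by omega, ?_⟩⟩)
      show max a1 b1 < min a2 b2
      exact h
    · have h' : a1 = a2 ∧ b1 ≤ a1 ∧ a1 < b2 := h
      exact Or.inr (Or.inr ⟨h'.1, by omega, h'.2.1, h'.2.2⟩)
    · have h' : b1 = b2 ∧ a1 ≤ b1 ∧ b1 < a2 := h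
      exact Or.inr (Or.inl ⟨by omega, Or.inr ⟨h'.1, h'.2.1, h'.2.2⟩⟩)
  · rintro (⟨h1, h2, h3, h4⟩ | ⟨h0, ⟨h1, h2⟩ | ⟨h1, h2, h3⟩⟩ | ⟨h1, h2, h3, h4⟩)
    · exact Or.inl ⟨h1, h2, h3, h4⟩
    · exact Or.inr (Or.inl h2)
    · exact Or.inr (Or.inr (Or.inr ⟨h1, h2, h3⟩))
    · exact Or.inr (Or.inr (Or.inl ⟨h1, h3, h4⟩))

lemma ptpt_iff (O T : List (Int × Int × List String)) :
    pvPtLoop (pvSplit T).2 (pvSplit O).2.items = true ↔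
      ∃ x ∈ O, ∃ y ∈ T, x.1 = x.2.1 ∧ y.1 = y.2.1 ∧ x.1 = y.1 ∧ x.2.2 ≠ y.2.2 := by
  have hndO : (pvSplit O).2.keys.Nodup :=
    split_keys_nodup O _ (by simp)
  have hndT : (pvSplit T).2.keys.Nodup :=
    split_keys_nodup T _ (by simp)
  have hgO : ∀ p g, g ∈ (pvSplit O).2.getD p [] ↔ (p, p, g) ∈ O := fun p g => by
    simpa [PySem.Dict.getD_empty] using mem_split_getD O ([], PySem.Dict.empty) p g
  have hgT : ∀ p g, g ∈ (pvSplit T).2.getD p [] ↔ (p, p, g) ∈ T := fun p g => by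
    simpa [PySem.Dict.getD_empty] using mem_split_getD T ([], PySem.Dict.empty) p g
  have hkO : ∀ p, p ∈ (pvSplit O).2.keys ↔ ∃ l, (p, p, l) ∈ O := fun p => by
    simpa [PySem.Dict.keys_empty] using mem_split_keys O ([], PySem.Dict.empty) p
  have hkT : ∀ p, p ∈ (pvSplit T).2.keys ↔ ∃ l, (p, p, l) ∈ T := fun p => by
    simpa [PySem.Dict.keys_empty] using mem_split_keys T ([], PySem.Dict.empty) p
  have hneO : ∀ p ∈ (pvSplit O).2.keys, (pvSplit O).2.getD p [] ≠ [] :=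
    split_getD_ne_nil O _ (by simp [PySem.Dict.keys_empty])
  have hneT : ∀ p ∈ (pvSplit T).2.keys, (pvSplit T).2.getD p [] ≠ [] :=
    split_getD_ne_nil T _ (by simp [PySem.Dict.keys_empty])
  have hnodO : ∀ p, ((pvSplit O).2.getD p []).Nodup := fun p =>
    split_getD_nodup O _ p (by simp [PySem.Dict.getD_empty])
  have hnodT : ∀ p, ((pvSplit T).2.getD p []).Nodup := fun p =>
    split_getD_nodup T _ p (by simp [PySem.Dict.getD_empty])
  rw [pvPtLoop_iff]
  constructor
  · rintro ⟨⟨pos, og⟩, hpr, tg, hget, hcond⟩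
    have hogD : (pvSplit O).2.getD pos [] = og := PySem.Dict.getD_of_mem_items _ hpr hndO []
    have hposO : pos ∈ (pvSplit O).2.keys := PySem.Dict.mem_keys_of_mem_items _ hpr
    have htgD : (pvSplit T).2.getD pos [] = tg := PySem.Dict.getD_of_get?_eq_some _ [] hget
    have hposT : pos ∈ (pvSplit T).2.keys := by
      by_contra hc
      rw [← PySem.Dict.get?_eq_none_iff_not_mem_keys] at hc
      rw [hget] at hc
      exact absurd hc (by simp)
    obtain ⟨a, ha, b, hb, hne⟩ := (group_test_iff og tg (hogD ▸ hneO pos hposO)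
      (htgD ▸ hneT pos hposT) (hogD ▸ hnodO pos) (htgD ▸ hnodT pos)).mp (by simpa using hcond)
    exact ⟨(pos, pos, a), (hgO pos a).mp (hogD ▸ ha), (pos, pos, b), (hgT pos b).mp (htgD ▸ hb),
      rfl, rfl, rfl, hne⟩
  · rintro ⟨⟨a1, a2, lo⟩, hxO, ⟨b1, b2, lt'⟩, hyT, hdx, hdy, hpp, hne⟩
    have h1 : a1 = a2 := hdx
    have h2 : b1 = b2 := hdy
    have h3 : a1 = b1 := hpp
    have h4 : lo ≠ lt' := hne
    subst h1; subst h3; subst h2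
    have haO : lo ∈ (pvSplit O).2.getD a1 [] := (hgO a1 lo).mpr hxO
    have hbT : lt' ∈ (pvSplit T).2.getD a1 [] := (hgT a1 lt').mpr hyT
    have hposO : a1 ∈ (pvSplit O).2.keys := (hkO a1).mpr ⟨lo, hxO⟩
    have hposT : a1 ∈ (pvSplit T).2.keys := (hkT a1).mpr ⟨lt', hyT⟩
    have hgo? : (pvSplit O).2.get? a1 = some ((pvSplit O).2.getD a1 []) := by
      cases hq : (pvSplit O).2.get? a1 with
      | none => exact absurd ((PySem.Dict.get?_eq_none_iff_not_mem_keys _ _).mp hq) (by simp [hposO])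
      | some v => rw [PySem.Dict.getD_of_get?_eq_some _ [] hq]
    have hgt? : (pvSplit T).2.get? a1 = some ((pvSplit T).2.getD a1 []) := by
      cases hq : (pvSplit T).2.get? a1 with
      | none => exact absurd ((PySem.Dict.get?_eq_none_iff_not_mem_keys _ _).mp hq) (by simp [hposT])
      | some v => rw [PySem.Dict.getD_of_get?_eq_some _ [] hq]
    refine ⟨(a1, (pvSplit O).2.getD a1 []),
      (PySem.Dict.get?_eq_some_iff_mem_items _ _ _ hndO).mp hgo?,
      (pvSplit T).2.getD a1 [], hgt?, ?_⟩
    exact (group_test_iff _ _ (hneO _ hposO) (hneT _ hposT) (hnodO _) (hnodT _)).mpr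
      ⟨lo, haO, lt', hbT, h4⟩

lemma ov1_iff (O T : List (Int × Int × List String)) :
    any_cross_overlap (pvSplit O).1
        ((pvSplit T).1 ++ (pvSplit T).2.keys.map (fun p => (p, p + 1))) = true ↔
      ∃ x ∈ O, ∃ y ∈ T, x.1 < x.2.1 ∧ ((y.1 < y.2.1 ∧ max x.1 y.1 < min x.2.1 y.2.1)
        ∨ (y.1 = y.2.1 ∧ x.1 ≤ y.1 ∧ y.1 < x.2.1)) := by
  have hivO : ∀ iv : Int × Int, iv ∈ (pvSplit O).1 ↔ (∃ l, (iv.1, iv.2, l) ∈ O ∧ iv.1 < iv.2) :=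
    fun iv => by simpa using mem_split_iv O ([], PySem.Dict.empty) iv
  have hivT : ∀ iv : Int × Int, iv ∈ (pvSplit T).1 ↔ (∃ l, (iv.1, iv.2, l) ∈ T ∧ iv.1 < iv.2) :=
    fun iv => by simpa using mem_split_iv T ([], PySem.Dict.empty) iv
  have hkT : ∀ p, p ∈ (pvSplit T).2.keys ↔ ∃ l, (p, p, l) ∈ T := fun p => by
    simpa [PySem.Dict.keys_empty] using mem_split_keys T ([], PySem.Dict.empty) p
  rw [any_cross_overlap_iff _ _
    (fun p hp => ((hivO p).mp hp).choose_spec.2)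
    (by
      intro p hp
      rcases List.mem_append.mp hp with h | h
      · exact ((hivT p).mp h).choose_spec.2
      · obtain ⟨q, _, rfl⟩ := List.mem_map.mp h
        show q < q + 1
        omega)]
  constructor
  · rintro ⟨⟨u1, u2⟩, hx', y', hy', hov⟩
    obtain ⟨l, hlO, hlt⟩ := (hivO (u1, u2)).mp hx'
    rcases List.mem_append.mp hy' with hyiv | hymap
    · obtain ⟨v1, v2⟩ := y'
      obtain ⟨m, hmT, hmt⟩ := (hivT (v1, v2)).mp hyiv
      have hov' : max u1 v1 < min u2 v2 := hov
      exact ⟨(u1, u2, l), hlO, (v1, v2, m), hmT, hlt, Or.inl ⟨hmt, hov'⟩⟩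
    · obtain ⟨p, hp, rfl⟩ := List.mem_map.mp hymap
      obtain ⟨m, hmT⟩ := (hkT p).mp hp
      have hov' : max u1 p < min u2 (p + 1) := hov
      simp only [max_lt_iff, lt_min_iff] at hov'
      refine ⟨(u1, u2, l), hlO, (p, p, m), hmT, hlt, Or.inr ⟨rfl, ?_, ?_⟩⟩
      · show u1 ≤ p; omega
      · show p < u2; omega
  · rintro ⟨⟨a1, a2, lo⟩, hxO, ⟨b1, b2, m⟩, hyT, hdeg, hrest⟩
    have hdeg' : a1 < a2 := hdeg
    have hx' : (a1, a2) ∈ (pvSplit O).1 := (hivO (a1, a2)).mpr ⟨lo, hxO, hdeg'⟩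
    rcases hrest with ⟨hyd, hov⟩ | ⟨hyeq, hle1, hle2⟩
    · have hyd' : b1 < b2 := hyd
      have hy' : (b1, b2) ∈ (pvSplit T).1 ++ (pvSplit T).2.keys.map (fun p => (p, p + 1)) :=
        List.mem_append.mpr (Or.inl ((hivT (b1, b2)).mpr ⟨m, hyT, hyd'⟩))
      exact ⟨(a1, a2), hx', (b1, b2), hy', hov⟩
    · have hyeq' : b1 = b2 := hyeq
      subst hyeq'
      have hle1' : a1 ≤ b1 := hle1
      have hle2' : b1 < a2 := hle2
      have hpk : b1 ∈ (pvSplit T).2.keys := (hkT b1).mpr ⟨m, hyT⟩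
      refine ⟨(a1, a2), hx', (b1, b1 + 1),
        List.mem_append.mpr (Or.inr (List.mem_map.mpr ⟨b1, hpk, rfl⟩)), ?_⟩
      show max a1 b1 < min a2 (b1 + 1)
      simp only [max_lt_iff, lt_min_iff]
      omega

lemma ov2_iff (O T : List (Int × Int × List String)) :
    any_cross_overlap ((pvSplit O).2.keys.map (fun p => (p, p + 1))) (pvSplit T).1 = true ↔
      ∃ x ∈ O, ∃ y ∈ T, x.1 = x.2.1 ∧ y.1 < y.2.1 ∧ y.1 ≤ x.1 ∧ x.1 < y.2.1 := by
  have hivT : ∀ iv : Int × Int, iv ∈ (pvSplit T).1 ↔ (∃ l, (iv.1, iv.2, l) ∈ T ∧ iv.1 < iv.2) :=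
    fun iv => by simpa using mem_split_iv T ([], PySem.Dict.empty) iv
  have hkO : ∀ p, p ∈ (pvSplit O).2.keys ↔ ∃ l, (p, p, l) ∈ O := fun p => by
    simpa [PySem.Dict.keys_empty] using mem_split_keys O ([], PySem.Dict.empty) p
  rw [any_cross_overlap_iff _ _
    (by
      intro p hp
      obtain ⟨q, _, rfl⟩ := List.mem_map.mp hp
      show q < q + 1
      omega)
    (fun p hp => ((hivT p).mp hp).choose_spec.2)]
  constructor
  · rintro ⟨x', hx', ⟨v1, v2⟩, hy', hov⟩
    obtain ⟨p, hp, rfl⟩ := List.mem_map.mp hx'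
    obtain ⟨l, hlO⟩ := (hkO p).mp hp
    obtain ⟨m, hmT, hmt⟩ := (hivT (v1, v2)).mp hy'
    have hov' : max p v1 < min (p + 1) v2 := hov
    simp only [max_lt_iff, lt_min_iff] at hov'
    refine ⟨(p, p, l), hlO, (v1, v2, m), hmT, rfl, hmt, ?_, ?_⟩
    · show v1 ≤ p; omega
    · show p < v2; omega
  · rintro ⟨⟨a1, a2, lo⟩, hxO, ⟨b1, b2, m⟩, hyT, hdeg, hyd, hle1, hle2⟩
    have hdeg' : a1 = a2 := hdeg
    subst hdeg'
    have hyd' : b1 < b2 := hyd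
    have hle1' : b1 ≤ a1 := hle1
    have hle2' : a1 < b2 := hle2
    have hpk : a1 ∈ (pvSplit O).2.keys := (hkO a1).mpr ⟨lo, hxO⟩
    refine ⟨(a1, a1 + 1), List.mem_map.mpr ⟨a1, hpk, rfl⟩,
      (b1, b2), (hivT (b1, b2)).mpr ⟨m, hyT, hyd'⟩, ?_⟩
    show max a1 b1 < min (a1 + 1) b2
    simp only [max_lt_iff, lt_min_iff]
    omega

lemma edits_conflict_alt_iff (O T : List (Int × Int × List String)) :
    edits_conflict_alt O T = true ↔ ∃ x ∈ O, ∃ y ∈ T, ConflP x y := by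
  have halt : edits_conflict_alt O T =
      (pvPtLoop (pvSplit T).2 (pvSplit O).2.items
        || (any_cross_overlap (pvSplit O).1
              ((pvSplit T).1 ++ (pvSplit T).2.keys.map (fun p => (p, p + 1)))
            || any_cross_overlap ((pvSplit O).2.keys.map (fun p => (p, p + 1))) (pvSplit T).1)) := by
    simp only [edits_conflict_alt]
    split_ifs with h <;> simp [h]
  rw [halt]
  simp only [Bool.or_eq_true]
  rw [ptpt_iff, ov1_iff, ov2_iff]
  constructor
  · rintro (⟨x, hx, y, hy, hc⟩ | ⟨x, hx, y, hy, hc⟩ | ⟨x, hx, y, hy, hc⟩)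
    · exact ⟨x, hx, y, hy, (ConflP_cases x y).mpr (Or.inl hc)⟩
    · exact ⟨x, hx, y, hy, (ConflP_cases x y).mpr (Or.inr (Or.inl hc))⟩
    · exact ⟨x, hx, y, hy, (ConflP_cases x y).mpr (Or.inr (Or.inr hc))⟩
  · rintro ⟨x, hx, y, hy, hc⟩
    rcases (ConflP_cases x y).mp hc with h | h | h
    · exact Or.inl ⟨x, hx, y, hy, h⟩
    · exact Or.inr (Or.inl ⟨x, hx, y, hy, h⟩)
    · exact Or.inr (Or.inr ⟨x, hx, y, hy, h⟩)

-- ===== VERDICT (by name: the statement is the Claim_ definition above) =====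
theorem edits_conflict_spec : Claim_equal_edits_conflict := by
  intro O T _
  unfold Spec_edits_conflict
  exact Bool.eq_iff_iff.mpr ((edits_conflict_iff O T).trans (edits_conflict_alt_iff O T).symm)
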